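-- pv_equiv track=rewrite | github.com/Byeolsi/Algorithm | BJ_14938_서강그라운드/main.py | bfs
-- ===== SOURCE A (Python) =====
-- import heapq
--
-- def bfs(start: int, m: int, items: list, adj_map: dict) -> int:
--     # 최대 힙을 사용하는 이유:
--     # 최대한 적은 거리로 수색하는 경우, 더 많은 수색 범위가 남아 더 많은 구역을 수색할 수 있기 때문
--     pq = []
--     left_m = [-1 for _ in range(len(items) + 1)]
--     added = set()
--
--     result = 0
--     heapq.heappush(pq, (-m, start))
--     left_m[start] = m
--     while pq:
--         m, cur = heapq.heappop(pq)
--         m *= -1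
--         # 남은 수색 범위가 갱신되는 경우, 한 번 더 더하는 것을 방지
--         if not cur in added:
--             result += items[cur]
--             added.add(cur)
--
--         if left_m[cur] > m:
--             continue
--
--         for nxt, nxt_m in adj_map[cur]:
--             # 수색 범위에 닿지 않음
--             if m - nxt_m < 0:
--                 continue
--             if left_m[nxt] < m - nxt_m:
--                 heapq.heappush(pq, (-(m - nxt_m), nxt))
--                 left_m[nxt] = m - nxt_m
--
--     return result
-- ===== SOURCE B (Python) =====
-- def bfs(start: int, m: int, items: list, adj_map: dict) -> int:
--     # Bellman-Ford style fixpoint: repeatedly relax every edge of every node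
--     # until no remaining-budget improves, then sum the items of the budgeted
--     # nodes (start unconditionally).  No priority queue at all.
--     budget = {start: m}
--     changed = True
--     while changed:
--         changed = False
--         for u, edges in adj_map.items():
--             bu = budget.get(u)
--             if bu is None or bu < 0:
--                 continue
--             for v, w in edges:
--                 nb = bu - w
--                 if nb >= 0 and budget.get(v, -1) < nb:
--                     budget[v] = nb
--                     changed = True
--     return items[start] + sum(items[v] for v in budget if v != start)
-- ===== Notes on version B (the rewrite author's own statement) =====
-- stated objective: alternative
-- what changed: A runs a max-heap priority-queue search that accumulates the item sum while popping, guarded by an added-set and a -1 sentinel array; B has no heap at all: it is a Bellman-Ford-style fixpoint that sweeps over all adjacency lists repeatedly until no remaining-budget improves, then sums the items of the budgeted nodes in a separate pass.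
-- outside the precondition, e.g. on bfs(0, 5, [7, 3], {0: [(1, -2)], 1: []}): A returns 10, B returns 10; on bfs(0, 1, [4, 5], {0: [(1, 1)], 1: [(5, 1)]}): A returns 9, B returns 9; on bfs(0, 5, [4, 5], {0: [(1, 1), (-2, 1)], 1: [], -2: []}): A returns 9, B returns 13
import Mathlib
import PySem

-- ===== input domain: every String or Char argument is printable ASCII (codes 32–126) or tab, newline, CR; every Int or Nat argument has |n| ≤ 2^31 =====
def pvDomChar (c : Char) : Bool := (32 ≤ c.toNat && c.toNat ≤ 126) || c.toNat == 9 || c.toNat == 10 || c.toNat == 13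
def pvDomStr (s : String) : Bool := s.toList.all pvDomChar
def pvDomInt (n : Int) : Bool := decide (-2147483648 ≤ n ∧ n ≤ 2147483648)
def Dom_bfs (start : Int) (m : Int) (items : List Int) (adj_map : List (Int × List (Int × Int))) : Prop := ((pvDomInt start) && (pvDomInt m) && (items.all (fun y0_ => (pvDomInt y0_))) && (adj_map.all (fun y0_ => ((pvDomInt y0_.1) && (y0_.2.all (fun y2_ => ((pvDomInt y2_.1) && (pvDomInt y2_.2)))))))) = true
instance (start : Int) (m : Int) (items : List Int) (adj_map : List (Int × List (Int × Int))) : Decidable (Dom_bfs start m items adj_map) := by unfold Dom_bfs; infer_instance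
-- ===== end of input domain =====

-- B replaces A's max-heap "remaining search range" accumulate-during-pop algorithm by a
-- heap-free Bellman-Ford-style fixpoint: relax every edge repeatedly until no budget improves,
-- then sum the items of the budgeted nodes in a separate pass (start unconditionally).

-- Python's list index i (possibly negative) on a list of length len: i, or len + i from the end;
-- exact for -len ≤ i < len, which Pre_bfs guarantees for every access
def pvIdx (len : Nat) (v : Int) : Nat := if 0 ≤ v then v.toNat else (v + len).toNat

-- ===== PORT A =====
-- heapq is modelled as a list kept sorted by the Python tuple order, popped at the head:
-- heappop returns the minimum tuple, and equal tuples are identical, so this is exact.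
def pvKeyLe (a b : Int × Int) : Bool := decide (a.1 < b.1 ∨ (a.1 = b.1 ∧ a.2 ≤ b.2))

def pvHeapPush (h : List (Int × Int)) (x : Int × Int) : List (Int × Int) :=
  match h with
  | [] => [x]
  | y :: t => if pvKeyLe y x then y :: pvHeapPush t x else x :: y :: t

-- l[i] (negative i from the end); exact for -len ≤ i < len, guaranteed by Pre_bfs
def pvGetI (l : List Int) (i : Int) : Int := (PySem.List.pyGet? l i).getD 0

-- l[i] = v (negative i from the end); exact for -len ≤ i < len, guaranteed by Pre_bfs
def pvSetI (l : List Int) (i : Int) (v : Int) : List Int := l.set (pvIdx l.length i) v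

-- adj_map[k] on the association list (keys unique under Pre_bfs);
-- the [] default marks the KeyError case, which Pre_bfs excludes
def pvLookup (adj : List (Int × List (Int × Int))) (k : Int) : List (Int × Int) :=
  match adj with
  | [] => []
  | (k', v) :: rest => if k' = k then v else pvLookup rest k

-- the inner `for nxt, nxt_m in adj_map[cur]` loop of A
def pvRelaxA (mcur : Int) (nbrs : List (Int × Int)) (pq : List (Int × Int)) (lm : List Int) :
    List (Int × Int) × List Int :=
  match nbrs with
  | [] => (pq, lm)
  | (nxt, w) :: rest =>
    if mcur - w < 0 then pvRelaxA mcur rest pq lm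
    else if pvGetI lm nxt < mcur - w then
      pvRelaxA mcur rest (pvHeapPush pq (-(mcur - w), nxt)) (pvSetI lm nxt (mcur - w))
    else pvRelaxA mcur rest pq lm

-- A's `while pq` loop; fuel is an upper bound on the number of pops (each pop consumes one unit)
def pvLoopA (items : List Int) (adj : List (Int × List (Int × Int))) :
    Nat → List (Int × Int) → List Int → PySem.Set Int → Int → Int
  | 0, _, _, _, res => res
  | fuel + 1, pq, lm, added, res =>
    match pq with
    | [] => res
    | (k, cur) :: rest =>
      let mcur := k * (-1)
      let added' := if PySem.Set.contains added cur then added else PySem.Set.add added cur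
      let res' := if PySem.Set.contains added cur then res else res + pvGetI items cur
      if pvGetI lm cur > mcur then pvLoopA items adj fuel rest lm added' res'
      else
        let s := pvRelaxA mcur (pvLookup adj cur) rest lm
        pvLoopA items adj fuel s.1 s.2 added' res'

-- enough fuel for every input admitted by Pre_bfs (proved below via the potentials pvS and pvQ)
def pvFuel (m : Int) (items : List Int) : Nat := (items.length + 1) * (m + 1).toNat + 2

def bfs (start : Int) (m : Int) (items : List Int) (adj_map : List (Int × List (Int × Int))) : Int :=
  pvLoopA items adj_map (pvFuel m items)
    (pvHeapPush [] (-m, start))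
    (pvSetI (List.replicate (items.length + 1) (-1)) start m)
    PySem.Set.empty 0

-- ===== PORT B =====
-- the inner `for v, w in edges` loop of B
def pvRelaxEdges (bu : Int) (edges : List (Int × Int)) (d : PySem.Dict Int Int) (ch : Bool) :
    PySem.Dict Int Int × Bool :=
  match edges with
  | [] => (d, ch)
  | (v, w) :: rest =>
    if decide (0 ≤ bu - w) && decide (PySem.Dict.getD d v (-1) < bu - w) then
      pvRelaxEdges bu rest (PySem.Dict.insert d v (bu - w)) true
    else pvRelaxEdges bu rest d ch

-- one `for u, edges in adj_map.items()` pass of B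
def pvPass (l : List (Int × List (Int × Int))) (d : PySem.Dict Int Int) (ch : Bool) :
    PySem.Dict Int Int × Bool :=
  match l with
  | [] => (d, ch)
  | (u, edges) :: rest =>
    match PySem.Dict.get? d u with
    | none => pvPass rest d ch
    | some bu =>
      if bu < 0 then pvPass rest d ch
      else
        let s := pvRelaxEdges bu edges d ch
        pvPass rest s.1 s.2

-- B's `while changed` loop; fuel bounds the number of passes (proved below via pvQ)
def pvLoopBF (adj : List (Int × List (Int × Int))) : Nat → PySem.Dict Int Int → PySem.Dict Int Int
  | 0, d => d
  | fuel + 1, d =>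
    let s := pvPass adj d false
    if s.2 then pvLoopBF adj fuel s.1 else s.1

-- `sum(items[v] for v in budget if v != start)`
def pvSumKeys (items : List Int) (start : Int) (ks : List Int) : Int :=
  ks.foldl (fun acc v => if v ≠ start then acc + pvGetI items v else acc) 0

def bfs_alt (start : Int) (m : Int) (items : List Int) (adj_map : List (Int × List (Int × Int))) : Int :=
  pvGetI items start + pvSumKeys items start
    (PySem.Dict.keys (pvLoopBF adj_map (pvFuel m items) (PySem.Dict.insert PySem.Dict.empty start m)))

-- ===== PRECONDITION & SPEC =====
-- The nodes A's search can possibly visit: targets of edges costing at most m, transitively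
-- from start (an over-approximation of the searched region, independent of A's algorithm).
def pvTargets (adj : List (Int × List (Int × Int))) (m : Int) (R : List Int) : List Int :=
  (adj.filter (fun p => decide (p.1 ∈ R))).flatMap
    (fun p => (p.2.filter (fun e => decide (e.2 ≤ m))).map (fun e => e.1))

def pvGrow (adj : List (Int × List (Int × Int))) (m : Int) (R : List Int) : List Int :=
  (pvTargets adj m R).foldl PySem.Set.add R

def pvReach (adj : List (Int × List (Int × Int))) (m : Int) (start : Int) : List Int :=
  (pvGrow adj m)^[1 + (adj.flatMap (fun p => p.2)).length] [start]

-- Pre_bfs excludes the inputs on which A raises or can loop forever, described by the region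
-- pvReach that the search can possibly visit: every possibly-visited node must be a valid
-- Python items-index (negative ids wrap around, as in Python) and an adj_map key, with
-- nonnegative edge weights (a negative weight can make A loop forever); two distinct
-- possibly-visited ids may not wrap to the same left_m slot (A's sentinel array would then
-- alias them); duplicate adj_map keys are excluded because a Python dict cannot carry them.
-- This over-approximates the actually-searched region, so it also excludes some inputs on
-- which A returns (an offending node that the budget never lets A reach) — see the examples.
def Pre_bfs (start : Int) (m : Int) (items : List Int) (adj_map : List (Int × List (Int × Int))) : Prop :=
  (adj_map.map Prod.fst).Nodup ∧
  (∀ u ∈ pvReach adj_map m start,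
    -(items.length : Int) ≤ u ∧ u < (items.length : Int) ∧ u ∈ adj_map.map Prod.fst) ∧
  (∀ u ∈ pvReach adj_map m start, ∀ v ∈ pvReach adj_map m start,
    pvIdx (items.length + 1) u = pvIdx (items.length + 1) v → u = v) ∧
  (∀ p ∈ adj_map, p.1 ∈ pvReach adj_map m start → ∀ e ∈ p.2, 0 ≤ e.2)
instance (start : Int) (m : Int) (items : List Int) (adj_map : List (Int × List (Int × Int))) :
    Decidable (Pre_bfs start m items adj_map) := by unfold Pre_bfs; infer_instance

def pvWitness_bfs : Int × Int × List Int × (List (Int × List (Int × Int))) :=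
  (0, 5, [7, 3], [(0, [(1, 2)]), (1, [])])

def Spec_bfs (start : Int) (m : Int) (items : List Int) (adj_map : List (Int × List (Int × Int))) (out : Int) : Prop := out = bfs_alt start m items adj_map
instance (start : Int) (m : Int) (items : List Int) (adj_map : List (Int × List (Int × Int))) (out : Int) : Decidable (Spec_bfs start m items adj_map out) := by unfold Spec_bfs; infer_instance

-- ===== CLAIM (what is proved, stated in full; the proofs are below) =====
def Claim_equal_bfs : Prop := ∀ (start : Int) (m : Int) (items : List Int) (adj_map : List (Int × List (Int × Int))), Dom_bfs start m items adj_map → Pre_bfs start m items adj_map → Spec_bfs start m items adj_map (bfs start m items adj_map)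

-- ===== LEMMAS AND PROOFS =====

-- chains of relaxations: `pvChain adj start m v b` ⇔ budget b is achievable at node v
inductive pvChain (adj : List (Int × List (Int × Int))) (start m : Int) : Int → Int → Prop
  | base : pvChain adj start m start m
  | step (u b v w : Int) : pvChain adj start m u b → (v, w) ∈ pvLookup adj u →
      0 ≤ b - w → pvChain adj start m v (b - w)

-- A's left_m read through Python's index rule, and B's budget lookup, as node-keyed maps
def pvLMget (lm : List Int) (v : Int) : Int := lm.getD (pvIdx lm.length v) (-1)

def pvGD (d : PySem.Dict Int Int) (v : Int) : Int := PySem.Dict.getD d v (-1)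

-- potential for A's loop: total headroom left in the left_m table
def pvS (m0 : Int) (lm : List Int) : Nat := (lm.map (fun v => (m0 - v).toNat)).sum

-- potential for B's loop: total budget collected so far (strictly grows each changed pass)
def pvQ (m0 : Int) (R : List Int) (d : PySem.Dict Int Int) : Nat :=
  (R.map (fun v => (pvGD d v + 1).toNat)).sum

lemma chain_nonneg (adj : List (Int × List (Int × Int))) (start m v b : Int) (hm : 0 ≤ m)
    (h : pvChain adj start m v b) : 0 ≤ b := by
  induction h with
  | base => exact hm
  | step u b v w _ _ hb _ => exact hb

lemma chain_le_fix (adj : List (Int × List (Int × Int))) (start m : Int) (h : Int → Int)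
    (hm : 0 ≤ m) (hst : m ≤ h start)
    (hfix : ∀ u v w : Int, (v, w) ∈ pvLookup adj u → 0 ≤ h u → 0 ≤ h u - w → h u - w ≤ h v) :
    ∀ v b : Int, pvChain adj start m v b → b ≤ h v := by
  intro v b hc
  induction hc with
  | base => exact hst
  | step u b v w hu hmem hb ih =>
    have hbu : 0 ≤ b := chain_nonneg adj start m u b hm hu
    have h1 : 0 ≤ h u := le_trans hbu ih
    have h2 : 0 ≤ h u - w := by omega
    have := hfix u v w hmem h1 h2
    omega

lemma tables_eq (adj : List (Int × List (Int × Int))) (start m : Int) (f g : Int → Int)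
    (hm : 0 ≤ m)
    (hfS : ∀ v, f v = -1 ∨ pvChain adj start m v (f v))
    (hgS : ∀ v, g v = -1 ∨ pvChain adj start m v (g v))
    (hfG : ∀ v, -1 ≤ f v) (hgG : ∀ v, -1 ≤ g v)
    (hfst : m ≤ f start) (hgst : m ≤ g start)
    (hfF : ∀ u v w : Int, (v, w) ∈ pvLookup adj u → 0 ≤ f u → 0 ≤ f u - w → f u - w ≤ f v)
    (hgF : ∀ u v w : Int, (v, w) ∈ pvLookup adj u → 0 ≤ g u → 0 ≤ g u - w → g u - w ≤ g v) :
    ∀ v, f v = g v := by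
  intro v
  rcases hfS v with hf | hf
  · rcases hgS v with hg | hg
    · rw [hf, hg]
    · have := chain_le_fix adj start m f hm hfst hfF v (g v) hg
      have := hgG v
      omega
  · have h1 := chain_le_fix adj start m g hm hgst hgF v (f v) hf
    rcases hgS v with hg | hg
    · have := hfG v
      omega
    · have h2 := chain_le_fix adj start m f hm hfst hfF v (g v) hg
      omega

lemma mem_hpush (h : List (Int × Int)) (x p : Int × Int) :
    p ∈ pvHeapPush h x ↔ p = x ∨ p ∈ h := by
  induction h with
  | nil => simp [pvHeapPush]
  | cons y t ih =>
    simp only [pvHeapPush]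
    split
    · simp only [List.mem_cons, ih]; try tauto
    · simp only [List.mem_cons]; try tauto

lemma length_hpush (h : List (Int × Int)) (x : Int × Int) :
    (pvHeapPush h x).length = h.length + 1 := by
  induction h with
  | nil => simp [pvHeapPush]
  | cons y t ih =>
    simp only [pvHeapPush]
    split
    · simp [ih]
    · simp

lemma getD_set {α : Type} (l : List α) (j : Nat) (v d : α) (i : Nat) (hj : j < l.length) :
    (l.set j v).getD i d = if i = j then v else l.getD i d := by
  simp only [List.getD_eq_getElem?_getD, List.getElem?_set]
  split_ifs with h1 h2 <;> try omega
  · subst h1; simp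
  · rfl

lemma getD_of_len_le {α : Type} (l : List α) (i : Nat) (d : α) (h : l.length ≤ i) :
    l.getD i d = d := by
  simp [List.getD_eq_getElem?_getD, List.getElem?_eq_none h]

lemma pvIdx_lt (len : Nat) (v : Int) (h0 : -(len : Int) ≤ v) (h1 : v < (len : Int)) :
    pvIdx len v < len := by
  unfold pvIdx
  split <;> omega

lemma pvGetI_idx (l : List Int) (i : Int) (h0 : -(l.length : Int) ≤ i)
    (h1 : i < (l.length : Int)) (d : Int) : pvGetI l i = l.getD (pvIdx l.length i) d := by
  rcases (by omega : 0 ≤ i ∨ i < 0) with h | h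
  · have hlt : i.toNat < l.length := by omega
    rw [pvGetI, PySem.List.pyGet?_eq_some_getElem l h h1]
    unfold pvIdx
    rw [if_pos h]
    simp [List.getD_eq_getElem?_getD, List.getElem?_eq_getElem hlt]
  · have hk0 : 0 < (-i).toNat := by omega
    have hkl : (-i).toNat ≤ l.length := by omega
    have hieq : i = -(((-i).toNat : Nat) : Int) := by omega
    rw [pvGetI, hieq, PySem.List.pyGet?_neg_natCast l (-i).toNat hk0 hkl]
    have hj : l.length - (-i).toNat < l.length := by omega
    have hidx : pvIdx l.length i = l.length - (-i).toNat := by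
      unfold pvIdx
      rw [if_neg (by omega)]
      omega
    rw [← hieq, hidx]
    simp [List.getD_eq_getElem?_getD, List.getElem?_eq_getElem hj]

lemma pvLMget_setI (lm : List Int) (u x v : Int) (hu0 : -(lm.length : Int) ≤ u)
    (hu1 : u < (lm.length : Int)) :
    pvLMget (pvSetI lm u x) v
      = if pvIdx lm.length v = pvIdx lm.length u then x else pvLMget lm v := by
  unfold pvLMget pvSetI
  rw [List.length_set, getD_set _ _ _ _ _ (pvIdx_lt lm.length u hu0 hu1)]

lemma pvGetI_LMget (lm : List Int) (v : Int) (h0 : -(lm.length : Int) ≤ v)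
    (h1 : v < (lm.length : Int)) : pvGetI lm v = pvLMget lm v :=
  pvGetI_idx lm v h0 h1 (-1)

lemma pvS_set_lt (m0 : Int) (lm : List Int) (j : Nat) (v : Int) (hj : j < lm.length)
    (hold : lm.getD j (-1) < v) (hv : v ≤ m0) :
    pvS m0 (lm.set j v) < pvS m0 lm := by
  induction lm generalizing j with
  | nil => simp at hj
  | cons a t ih =>
    cases j with
    | zero =>
      simp only [List.set_cons_zero, pvS, List.map_cons, List.sum_cons]
      simp only [List.getD_cons_zero] at hold
      omega
    | succ j =>
      simp only [List.set_cons_succ, pvS, List.map_cons, List.sum_cons]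
      have := ih j (by simpa using hj) (by simpa using hold)
      simp only [pvS] at this
      omega

lemma mem_pvLookup (adj : List (Int × List (Int × Int))) (k : Int) (e : Int × Int)
    (he : e ∈ pvLookup adj k) : ∃ p ∈ adj, p.1 = k ∧ e ∈ p.2 := by
  induction adj with
  | nil => simp [pvLookup] at he
  | cons a rest ih =>
    rw [show pvLookup (a :: rest) k = if a.1 = k then a.2 else pvLookup rest k from rfl] at he
    split at he
    · exact ⟨a, by simp, by assumption, he⟩
    · obtain ⟨p, hp, h1, h2⟩ := ih he
      exact ⟨p, by simp [hp], h1, h2⟩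

lemma pvLookup_eq_of_mem (adj : List (Int × List (Int × Int))) (u : Int)
    (es : List (Int × Int)) (hnd : (adj.map Prod.fst).Nodup) (hmem : (u, es) ∈ adj) :
    pvLookup adj u = es := by
  induction adj with
  | nil => simp at hmem
  | cons a rest ih =>
    rw [show pvLookup (a :: rest) u = if a.1 = u then a.2 else pvLookup rest u from rfl]
    rcases List.mem_cons.mp hmem with rfl | hmem'
    · simp
    · have ha : a.1 ≠ u := by
        intro h
        have : u ∈ rest.map Prod.fst := List.mem_map.mpr ⟨(u, es), hmem', rfl⟩
        simp only [List.map_cons, List.nodup_cons] at hnd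
        exact hnd.1 (h ▸ this)
      rw [if_neg ha]
      exact ih (by simp only [List.map_cons, List.nodup_cons] at hnd; exact hnd.2) hmem'

lemma pvContains_true (s : PySem.Set Int) (x : Int) (h : x ∈ s) :
    PySem.Set.contains s x = true := by
  simp [PySem.Set.contains, h]

lemma pvContains_false (s : PySem.Set Int) (x : Int) (h : x ∉ s) :
    PySem.Set.contains s x = false := by
  simp only [PySem.Set.contains]
  simpa using h

lemma pvAdd_eq (s : PySem.Set Int) (x : Int) (h : x ∉ s) : PySem.Set.add s x = s ++ [x] := by
  simp only [PySem.Set.add, pvContains_false s x h]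
  simp

lemma length_le_setAdd (s : List Int) (x : Int) : s.length ≤ (PySem.Set.add s x).length := by
  by_cases h : x ∈ s
  · simp [PySem.Set.add, h]
  · rw [pvAdd_eq s x h]; simp

lemma nodup_setAdd (s : List Int) (x : Int) (h : s.Nodup) : (PySem.Set.add s x).Nodup := by
  by_cases hx : x ∈ s
  · simpa [PySem.Set.add, hx] using h
  · rw [pvAdd_eq s x hx]
    rw [List.nodup_append]
    refine ⟨h, List.nodup_singleton x, ?_⟩
    intro a ha b hb
    rw [List.mem_singleton] at hb
    subst hb
    exact fun hab => hx (hab ▸ ha)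

lemma mem_foldlAdd (l : List Int) : ∀ (s : List Int) (x : Int),
    x ∈ l.foldl PySem.Set.add s ↔ x ∈ s ∨ x ∈ l := by
  induction l with
  | nil => intro s x; simp
  | cons b t ih =>
    intro s x
    rw [List.foldl_cons, ih, PySem.Set.mem_add s b x]
    simp only [List.mem_cons]
    tauto

lemma nodup_foldlAdd (l : List Int) : ∀ s : List Int, s.Nodup → (l.foldl PySem.Set.add s).Nodup := by
  induction l with
  | nil => intro s h; simpa
  | cons b t ih => intro s h; exact ih _ (nodup_setAdd s b h)

lemma length_le_foldlAdd (l : List Int) : ∀ s : List Int,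
    s.length ≤ (l.foldl PySem.Set.add s).length := by
  induction l with
  | nil => intro s; simp
  | cons b t ih => intro s; exact le_trans (length_le_setAdd s b) (ih _)

lemma foldlAdd_eq_or_lt (l : List Int) : ∀ s : List Int,
    l.foldl PySem.Set.add s = s ∨ s.length < (l.foldl PySem.Set.add s).length := by
  induction l with
  | nil => intro s; exact Or.inl rfl
  | cons b t ih =>
    intro s
    by_cases hb : b ∈ s
    · rw [List.foldl_cons,
        show PySem.Set.add s b = s from by simp [PySem.Set.add, hb]]
      exact ih s
    · right
      rw [List.foldl_cons, pvAdd_eq s b hb]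
      calc s.length < (s ++ [b]).length := by simp
        _ ≤ _ := length_le_foldlAdd t _

lemma mem_grow (adj : List (Int × List (Int × Int))) (m : Int) (R : List Int) (x : Int) :
    x ∈ pvGrow adj m R ↔ x ∈ R ∨ x ∈ pvTargets adj m R := mem_foldlAdd _ R x

lemma subset_iterGrow (adj : List (Int × List (Int × Int))) (m : Int) :
    ∀ (k : Nat) (R : List Int), R ⊆ (pvGrow adj m)^[k] R := by
  intro k
  induction k with
  | zero => intro R x hx; exact hx
  | succ k ih =>
    intro R x hx
    rw [Function.iterate_succ_apply]
    exact ih (pvGrow adj m R) ((mem_grow adj m R x).mpr (Or.inl hx))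

lemma targets_subset (adj : List (Int × List (Int × Int))) (m : Int) (R : List Int) :
    pvTargets adj m R ⊆ (adj.flatMap (fun p => p.2)).map (fun e => e.1) := by
  intro x hx
  simp only [pvTargets, List.mem_flatMap, List.mem_filter, List.mem_map] at hx
  obtain ⟨p, ⟨hp, _⟩, e, ⟨he, _⟩, rfl⟩ := hx
  simp only [List.mem_map, List.mem_flatMap]
  exact ⟨e, ⟨p, hp, he⟩, rfl⟩

lemma grow_subset_U (adj : List (Int × List (Int × Int))) (m start : Int) (R : List Int)
    (h : R ⊆ start :: (adj.flatMap (fun p => p.2)).map (fun e => e.1)) :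
    pvGrow adj m R ⊆ start :: (adj.flatMap (fun p => p.2)).map (fun e => e.1) := by
  intro x hx
  rcases (mem_grow adj m R x).mp hx with h1 | h1
  · exact h h1
  · exact List.mem_cons_of_mem _ (targets_subset adj m R h1)

lemma fix_reached (adj : List (Int × List (Int × Int))) (m start : Int) :
    ∀ (k : Nat) (R : List Int), R.Nodup →
    R ⊆ start :: (adj.flatMap (fun p => p.2)).map (fun e => e.1) →
    (start :: (adj.flatMap (fun p => p.2)).map (fun e => e.1)).length + 1 ≤ k + R.length →
    pvGrow adj m ((pvGrow adj m)^[k] R) = (pvGrow adj m)^[k] R := by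
  intro k
  induction k with
  | zero =>
    intro R hnd hsub hlen
    exfalso
    have h1 : R.toFinset.card = R.length := List.toFinset_card_of_nodup hnd
    have h2 : R.toFinset ⊆ (start :: (adj.flatMap (fun p => p.2)).map (fun e => e.1)).toFinset := by
      intro a ha
      rw [List.mem_toFinset] at ha ⊢
      exact hsub ha
    have h3 := Finset.card_le_card h2
    have h4 := (start :: (adj.flatMap (fun p => p.2)).map (fun e => e.1)).toFinset_card_le
    omega
  | succ k ih =>
    intro R hnd hsub hlen
    rcases foldlAdd_eq_or_lt (pvTargets adj m R) R with hfix | hlt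
    · have hfix' : pvGrow adj m R = R := hfix
      rw [Function.iterate_succ_apply, hfix', Function.iterate_fixed hfix' k]
      exact hfix'
    · have hlt' : R.length < (pvGrow adj m R).length := hlt
      rw [Function.iterate_succ_apply]
      exact ih (pvGrow adj m R) (nodup_foldlAdd _ _ hnd) (grow_subset_U adj m start R hsub)
        (by omega)

lemma reach_fix (adj : List (Int × List (Int × Int))) (m start : Int) :
    pvGrow adj m (pvReach adj m start) = pvReach adj m start := by
  apply fix_reached adj m start (1 + (adj.flatMap (fun p => p.2)).length) [start]
  · simp
  · intro x hx
    simp only [List.mem_singleton] at hx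
    subst hx
    exact List.mem_cons_self ..
  · simp

lemma start_mem_reach (adj : List (Int × List (Int × Int))) (m start : Int) :
    start ∈ pvReach adj m start :=
  subset_iterGrow adj m _ [start] (List.mem_singleton.mpr rfl)

lemma reach_nodup (adj : List (Int × List (Int × Int))) (m start : Int) :
    (pvReach adj m start).Nodup := by
  unfold pvReach
  generalize 1 + (adj.flatMap (fun p => p.2)).length = k
  induction k with
  | zero => simp
  | succ k ih =>
    rw [Function.iterate_succ_apply']
    exact nodup_foldlAdd _ _ ih

lemma reach_closed (adj : List (Int × List (Int × Int))) (m start : Int) :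
    ∀ u ∈ pvReach adj m start, ∀ e ∈ pvLookup adj u, e.2 ≤ m → e.1 ∈ pvReach adj m start := by
  intro u hu e he hw
  rw [← reach_fix adj m start]
  refine (mem_grow adj m _ e.1).mpr (Or.inr ?_)
  obtain ⟨p, hp, hk, hep⟩ := mem_pvLookup adj u e he
  simp only [pvTargets, List.mem_flatMap, List.mem_filter, List.mem_map]
  exact ⟨p, ⟨hp, by rw [hk]; exact decide_eq_true hu⟩, e, ⟨hep, decide_eq_true hw⟩, rfl⟩

lemma getD_replicate {α : Type} (k i : Nat) (a d : α) (h : i < k) :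
    (List.replicate k a).getD i d = a := by
  simp [List.getD_eq_getElem?_getD, h]

lemma pvS_le (m0 : Int) (lm : List Int) (c : Nat) (h : ∀ v ∈ lm, (m0 - v).toNat ≤ c) :
    pvS m0 lm ≤ lm.length * c := by
  induction lm with
  | nil => simp [pvS]
  | cons a t ih =>
    have ha := h a (List.mem_cons_self ..)
    have ht := ih fun v hv => h v (List.mem_cons_of_mem _ hv)
    simp only [pvS, List.map_cons, List.sum_cons, List.length_cons, Nat.succ_mul]
    simp only [pvS] at ht
    omega

-- a Nodup list mapping injectively into [0, n) has at most n elements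
lemma length_le_of_inj (R : List Int) (n : Nat) (f : Int → Nat) (hnd : R.Nodup)
    (hlt : ∀ x ∈ R, f x < n) (hinj : ∀ x ∈ R, ∀ y ∈ R, f x = f y → x = y) :
    R.length ≤ n := by
  have hmnd : (R.map f).Nodup := by
    rw [List.nodup_map_iff_inj_on hnd]
    exact hinj
  have h1 : (R.map f).toFinset.card = (R.map f).length := List.toFinset_card_of_nodup hmnd
  have h2 : (R.map f).toFinset ⊆ Finset.range n := by
    intro a ha
    rw [List.mem_toFinset, List.mem_map] at ha
    obtain ⟨x, hx, rfl⟩ := ha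
    exact Finset.mem_range.mpr (hlt x hx)
  have h3 := Finset.card_le_card h2
  rw [Finset.card_range, h1, List.length_map] at h3
  exact h3

-- invariants of A's loop state (R is the possibly-searched region pvReach)
def pvInvPQ (adj : List (Int × List (Int × Int))) (start m0 : Int) (R : List Int)
    (pq : List (Int × Int)) (lm : List Int) : Prop :=
  ∀ p ∈ pq, p.2 ∈ R ∧ pvChain adj start m0 p.2 (-p.1) ∧
    0 ≤ -p.1 ∧ -p.1 ≤ m0 ∧ -p.1 ≤ pvLMget lm p.2

def pvInvLM (adj : List (Int × List (Int × Int))) (start m0 : Int) (R : List Int) (n : Nat)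
    (lm : List Int) : Prop :=
  lm.length = n + 1 ∧
  (∀ s : Nat, -1 ≤ lm.getD s (-1) ∧ lm.getD s (-1) ≤ m0) ∧
  (∀ v ∈ R, pvLMget lm v = -1 ∨ pvChain adj start m0 v (pvLMget lm v))

def pvInvFix (adj : List (Int × List (Int × Int))) (R : List Int)
    (pq : List (Int × Int)) (lm : List Int) : Prop :=
  ∀ u ∈ R, 0 ≤ pvLMget lm u →
    (∃ p ∈ pq, p.2 = u ∧ -p.1 = pvLMget lm u) ∨
    (∀ e ∈ pvLookup adj u, pvLMget lm u - e.2 < 0 ∨ pvLMget lm u - e.2 ≤ pvLMget lm e.1)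

-- the inner relaxation loop of A preserves the invariants and fully relaxes its edge list
lemma relaxA_inv (adj : List (Int × List (Int × Int))) (start m0 : Int) (items R : List Int)
    (hGood : ∀ u ∈ R, (-(items.length : Int) ≤ u ∧ u < (items.length : Int)) ∧
      ∀ e ∈ pvLookup adj u, 0 ≤ e.2)
    (hclosed : ∀ u ∈ R, ∀ e ∈ pvLookup adj u, e.2 ≤ m0 → e.1 ∈ R)
    (hInj : ∀ u ∈ R, ∀ v ∈ R, pvIdx (items.length + 1) u = pvIdx (items.length + 1) v → u = v)
    (cur mcur : Int) (hcurR : cur ∈ R) (hch : pvChain adj start m0 cur mcur)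
    (hmcm : mcur ≤ m0) :
    ∀ (nbrs : List (Int × Int)), (∀ e ∈ nbrs, e ∈ pvLookup adj cur) →
    ∀ (pq : List (Int × Int)) (lm : List Int),
    pvInvPQ adj start m0 R pq lm →
    pvInvLM adj start m0 R items.length lm →
    pvInvLM adj start m0 R items.length (pvRelaxA mcur nbrs pq lm).2 ∧
    (∀ v : Int, pvLMget lm v ≤ pvLMget (pvRelaxA mcur nbrs pq lm).2 v) ∧
    pvInvPQ adj start m0 R (pvRelaxA mcur nbrs pq lm).1 (pvRelaxA mcur nbrs pq lm).2 ∧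
    (∀ v ∈ R, pvLMget (pvRelaxA mcur nbrs pq lm).2 v ≠ pvLMget lm v →
      ∃ p ∈ (pvRelaxA mcur nbrs pq lm).1, p.2 = v ∧
        -p.1 = pvLMget (pvRelaxA mcur nbrs pq lm).2 v) ∧
    (∀ p ∈ pq, p ∈ (pvRelaxA mcur nbrs pq lm).1) ∧
    (∀ e ∈ nbrs, mcur - e.2 < 0 ∨ mcur - e.2 ≤ pvLMget (pvRelaxA mcur nbrs pq lm).2 e.1) ∧
    (pvRelaxA mcur nbrs pq lm).1.length + pvS m0 (pvRelaxA mcur nbrs pq lm).2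
      ≤ pq.length + pvS m0 lm := by
  intro nbrs
  induction nbrs with
  | nil =>
    intro _ pq lm hPQ hLM
    simp only [pvRelaxA]
    exact ⟨hLM, fun v => le_refl _, hPQ, fun v _ hv => absurd rfl hv, fun p hp => hp,
      fun e he => absurd he (List.not_mem_nil), le_refl _⟩
  | cons e rest ih =>
    obtain ⟨nxt, w⟩ := e
    intro hnb pq lm hPQ hLM
    have hmem : (nxt, w) ∈ pvLookup adj cur := hnb (nxt, w) (List.mem_cons_self ..)
    have hrest : ∀ e ∈ rest, e ∈ pvLookup adj cur := fun e he => hnb e (List.mem_cons_of_mem _ he)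
    obtain ⟨hlen, hbnd, hchr⟩ := hLM
    by_cases hb : mcur - w < 0
    · have eA : pvRelaxA mcur ((nxt, w) :: rest) pq lm = pvRelaxA mcur rest pq lm := by
        simp only [pvRelaxA, if_pos hb]
      rw [eA]
      obtain ⟨c1, c2, c3, c4, c5, c6, c7⟩ := ih hrest pq lm hPQ ⟨hlen, hbnd, hchr⟩
      exact ⟨c1, c2, c3, c4, c5, by
        intro e he
        rcases List.mem_cons.mp he with rfl | he'
        · exact Or.inl hb
        · exact c6 e he', c7⟩
    · -- the edge is affordable: its target is in the searched region
      have hw0 : 0 ≤ w := (hGood cur hcurR).2 (nxt, w) hmem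
      have hnR : nxt ∈ R := hclosed cur hcurR (nxt, w) hmem (by omega)
      have hnwin : -(items.length : Int) ≤ nxt ∧ nxt < (items.length : Int) :=
        (hGood nxt hnR).1
      have hnwin' : -(lm.length : Int) ≤ nxt ∧ nxt < (lm.length : Int) := by
        rw [hlen]
        push_cast
        omega
      have hGI : pvGetI lm nxt = pvLMget lm nxt := pvGetI_LMget lm nxt hnwin'.1 hnwin'.2
      have hgetset : ∀ v : Int, pvLMget (pvSetI lm nxt (mcur - w)) v
          = if pvIdx lm.length v = pvIdx lm.length nxt then mcur - w else pvLMget lm v :=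
        fun v => pvLMget_setI lm nxt (mcur - w) v hnwin'.1 hnwin'.2
      have hmc0 : 0 ≤ mcur := by omega
      by_cases himp : pvGetI lm nxt < mcur - w
      · have eA : pvRelaxA mcur ((nxt, w) :: rest) pq lm
            = pvRelaxA mcur rest (pvHeapPush pq (-(mcur - w), nxt))
                (pvSetI lm nxt (mcur - w)) := by
          simp only [pvRelaxA, if_neg hb, if_pos himp]
        rw [eA]
        rw [hGI] at himp
        have hchn : pvChain adj start m0 nxt (mcur - w) :=
          pvChain.step cur mcur nxt w hch hmem (by omega)
        -- the aliasing-free slot view of the update, for nodes of R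
        have hgetR : ∀ v ∈ R, pvLMget (pvSetI lm nxt (mcur - w)) v
            = if v = nxt then mcur - w else pvLMget lm v := by
          intro v hv
          rw [hgetset v]
          by_cases hvv : v = nxt
          · rw [if_pos hvv, if_pos (by rw [hvv])]
          · rw [if_neg hvv, if_neg ?_]
            intro hslot
            rw [hlen] at hslot
            exact hvv (hInj v hv nxt hnR hslot)
        have hLM' : pvInvLM adj start m0 R items.length (pvSetI lm nxt (mcur - w)) := by
          refine ⟨by unfold pvSetI; rw [List.length_set]; exact hlen, ?_, ?_⟩
          · intro s
            unfold pvSetI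
            rw [getD_set _ _ _ _ _ (pvIdx_lt lm.length nxt hnwin'.1 hnwin'.2)]
            split
            · omega
            · exact hbnd s
          · intro v hv
            rw [hgetR v hv]
            split
            · rename_i hvv
              subst hvv
              exact Or.inr hchn
            · exact hchr v hv
        have hPQ' : pvInvPQ adj start m0 R (pvHeapPush pq (-(mcur - w), nxt))
            (pvSetI lm nxt (mcur - w)) := by
          intro p hp
          rcases (mem_hpush pq (-(mcur - w), nxt) p).mp hp with rfl | hp'
          · refine ⟨hnR, by simpa using hchn, by omega, by omega, ?_⟩
            show -(-(mcur - w)) ≤ _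
            rw [hgetR nxt hnR, if_pos rfl]
            omega
          · obtain ⟨a1, a2, a3, a4, a5⟩ := hPQ p hp'
            refine ⟨a1, a2, a3, a4, ?_⟩
            rw [hgetR p.2 a1]
            split
            · rename_i hEq
              rw [hEq] at a5
              omega
            · exact a5
        obtain ⟨c1, c2, c3, c4, c5, c6, c7⟩ :=
          ih hrest (pvHeapPush pq (-(mcur - w), nxt)) (pvSetI lm nxt (mcur - w)) hPQ' hLM'
        have hmono : ∀ v : Int, pvLMget lm v ≤ pvLMget (pvSetI lm nxt (mcur - w)) v := by
          intro v
          rw [hgetset v]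
          split
          · rename_i hEq
            have : pvLMget lm v = pvLMget lm nxt := by
              unfold pvLMget
              rw [hEq]
            omega
          · exact le_refl _
        refine ⟨c1, fun v => le_trans (hmono v) (c2 v), c3, ?_, ?_, ?_, ?_⟩
        · -- every changed entry has a pending heap entry carrying its new value
          intro v hvR hv
          by_cases hmid : pvLMget (pvRelaxA mcur rest (pvHeapPush pq (-(mcur - w), nxt))
              (pvSetI lm nxt (mcur - w))).2 v
              = pvLMget (pvSetI lm nxt (mcur - w)) v
          · have hvn : v = nxt := by
              by_contra hne
              rw [hmid, hgetR v hvR, if_neg hne] at hv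
              exact hv rfl
            subst hvn
            refine ⟨(-(mcur - w), v), c5 _ ((mem_hpush ..).mpr (Or.inl rfl)), rfl, ?_⟩
            rw [hmid, hgetR v hvR, if_pos rfl]
            simp only
            omega
          · exact c4 v hvR hmid
        · intro p hp
          exact c5 p ((mem_hpush ..).mpr (Or.inr hp))
        · intro e he
          rcases List.mem_cons.mp he with rfl | he'
          · right
            have h1 : pvLMget (pvSetI lm nxt (mcur - w)) nxt = mcur - w := by
              rw [hgetR nxt hnR, if_pos rfl]
            calc mcur - w = pvLMget (pvSetI lm nxt (mcur - w)) nxt := h1.symm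
              _ ≤ _ := c2 nxt
          · exact c6 e he'
        · have hlenp := length_hpush pq (-(mcur - w), nxt)
          have hS : pvS m0 (pvSetI lm nxt (mcur - w)) < pvS m0 lm := by
            unfold pvSetI
            apply pvS_set_lt m0 lm _ (mcur - w)
              (pvIdx_lt lm.length nxt hnwin'.1 hnwin'.2)
            · exact himp
            · omega
          omega
      · have eA : pvRelaxA mcur ((nxt, w) :: rest) pq lm = pvRelaxA mcur rest pq lm := by
          simp only [pvRelaxA, if_neg hb, if_neg himp]
        rw [eA]
        obtain ⟨c1, c2, c3, c4, c5, c6, c7⟩ := ih hrest pq lm hPQ ⟨hlen, hbnd, hchr⟩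
        refine ⟨c1, c2, c3, c4, c5, ?_, c7⟩
        intro e he
        rcases List.mem_cons.mp he with rfl | he'
        · right
          rw [hGI] at himp
          calc mcur - w ≤ pvLMget lm nxt := by omega
            _ ≤ _ := c2 nxt
        · exact c6 e he'

-- A's main loop terminates in a table that is a sound relaxation fixpoint, and its result
-- is the item sum over the visited nodes
lemma loopA_inv (adj : List (Int × List (Int × Int))) (start m0 : Int) (items R : List Int)
    (hGood : ∀ u ∈ R, (-(items.length : Int) ≤ u ∧ u < (items.length : Int)) ∧
      ∀ e ∈ pvLookup adj u, 0 ≤ e.2)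
    (hclosed : ∀ u ∈ R, ∀ e ∈ pvLookup adj u, e.2 ≤ m0 → e.1 ∈ R)
    (hInj : ∀ u ∈ R, ∀ v ∈ R, pvIdx (items.length + 1) u = pvIdx (items.length + 1) v → u = v) :
    ∀ (fuel : Nat) (pq : List (Int × Int)) (lm : List Int) (added : PySem.Set Int) (res : Int),
    pvInvPQ adj start m0 R pq lm →
    pvInvLM adj start m0 R items.length lm →
    pvInvFix adj R pq lm →
    m0 ≤ pvLMget lm start →
    added.Nodup →
    (∀ x ∈ added, x ∈ R) →
    (∀ v ∈ R, ((v ∈ added ∨ ∃ p ∈ pq, p.2 = v) ↔ 0 ≤ pvLMget lm v)) →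
    res = (added.map (fun v => pvGetI items v)).sum →
    pq.length + pvS m0 lm < fuel →
    ∃ (lmf addedf : List Int),
      pvInvLM adj start m0 R items.length lmf ∧
      m0 ≤ pvLMget lmf start ∧
      (∀ u ∈ R, 0 ≤ pvLMget lmf u → ∀ e ∈ pvLookup adj u,
        pvLMget lmf u - e.2 < 0 ∨ pvLMget lmf u - e.2 ≤ pvLMget lmf e.1) ∧
      addedf.Nodup ∧
      (∀ x ∈ addedf, x ∈ R) ∧
      (∀ v ∈ R, (v ∈ addedf ↔ 0 ≤ pvLMget lmf v)) ∧
      pvLoopA items adj fuel pq lm added res = (addedf.map (fun v => pvGetI items v)).sum := by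
  intro fuel
  induction fuel with
  | zero =>
    intro pq lm added res _ _ _ _ _ _ _ _ hf
    omega
  | succ fuel ih =>
    intro pq lm added res hPQ hLM hFix hst hand haddR hmm hres hf
    cases pq with
    | nil =>
      refine ⟨lm, added, hLM, hst, ?_, hand, haddR, ?_, ?_⟩
      · intro u huR hu
        rcases hFix u huR hu with ⟨p, hp, _⟩ | h
        · exact absurd hp (List.not_mem_nil)
        · exact h
      · intro v hv
        rw [← hmm v hv]
        simp
      · simp only [pvLoopA]
        exact hres
    | cons hd rest =>
      obtain ⟨k, cur⟩ := hd
      obtain ⟨hcR, hcch, hk0, hkm, hkle⟩ := hPQ (k, cur) (List.mem_cons_self ..)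
      simp only at hcR hcch hk0 hkm hkle
      obtain ⟨hlen, hbnd, hchr⟩ := hLM
      have hcwin : -(lm.length : Int) ≤ cur ∧ cur < (lm.length : Int) := by
        have := (hGood cur hcR).1
        rw [hlen]
        push_cast
        omega
      have hGI : pvGetI lm cur = pvLMget lm cur := pvGetI_LMget lm cur hcwin.1 hcwin.2
      -- the updated added-set and result
      have hset : ∀ x : Int,
          (x ∈ (if PySem.Set.contains added cur then added else PySem.Set.add added cur)
            ↔ (x ∈ added ∨ x = cur)) := by
        intro x
        by_cases hmemc : cur ∈ added
        · rw [if_pos (pvContains_true added cur hmemc)]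
          constructor
          · exact Or.inl
          · rintro (h | rfl) <;> [exact h; exact hmemc]
        · rw [if_neg (by rw [pvContains_false added cur hmemc]; simp),
            pvAdd_eq added cur hmemc, List.mem_append, List.mem_singleton]
      have hand' : (if PySem.Set.contains added cur then added
          else PySem.Set.add added cur).Nodup := by
        split
        · exact hand
        · exact nodup_setAdd added cur hand
      have haddR' : ∀ x ∈ (if PySem.Set.contains added cur then added
          else PySem.Set.add added cur), x ∈ R := by
        intro x hx
        rcases (hset x).mp hx with h | rfl
        · exact haddR x h
        · exact hcR
      have hres' :
          (if PySem.Set.contains added cur then res else res + pvGetI items cur)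
            = ((if PySem.Set.contains added cur then added
                else PySem.Set.add added cur).map (fun v => pvGetI items v)).sum := by
        by_cases hmemc : cur ∈ added
        · rw [if_pos (pvContains_true added cur hmemc), if_pos (pvContains_true added cur hmemc)]
          exact hres
        · have hcf : PySem.Set.contains added cur = false := pvContains_false added cur hmemc
          rw [if_neg (by rw [hcf]; simp), if_neg (by rw [hcf]; simp), pvAdd_eq added cur hmemc,
            List.map_append, List.sum_append, hres]
          simp
      simp only [pvLoopA, hGI]
      rw [show k * (-1) = -k from by ring]
      set added' := (if PySem.Set.contains added cur then added else PySem.Set.add added cur)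
        with hA
      by_cases hskip : pvLMget lm cur > -k
      · rw [if_pos hskip]
        apply ih rest lm added' _
          (fun p hp => hPQ p (List.mem_cons_of_mem _ hp)) ⟨hlen, hbnd, hchr⟩ _ hst hand'
          haddR' _ hres' (by simp only [List.length_cons] at hf; omega)
        · -- the stale entry's node keeps a pending witness in the rest of the queue
          intro u huR hu
          rcases hFix u huR hu with ⟨p, hp, he, hv⟩ | h
          · rcases List.mem_cons.mp hp with rfl | hp'
            · exfalso
              simp only at he hv
              rw [he] at hskip
              omega
            · exact Or.inl ⟨p, hp', he, hv⟩
          · exact Or.inr h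
        · intro v hv
          rw [← hmm v hv]
          constructor
          · rintro (h | ⟨p, hp, he⟩)
            · rcases (hset _).mp h with h' | rfl
              · exact Or.inl h'
              · exact Or.inr ⟨(k, v), List.mem_cons_self .., rfl⟩
            · exact Or.inr ⟨p, List.mem_cons_of_mem _ hp, he⟩
          · rintro (h | ⟨p, hp, he⟩)
            · exact Or.inl ((hset _).mpr (Or.inl h))
            · rcases List.mem_cons.mp hp with rfl | hp'
              · simp only at he
                exact Or.inl ((hset _).mpr (Or.inr he.symm))
              · exact Or.inr ⟨p, hp', he⟩
      · rw [if_neg hskip]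
        have hkeq : pvLMget lm cur = -k := by omega
        obtain ⟨c1, c2, c3, c4, c5, c6, c7⟩ :=
          relaxA_inv adj start m0 items R hGood hclosed hInj cur (-k) hcR
            (by simpa using hcch) (by omega) (pvLookup adj cur) (fun e he => he) rest lm
            (fun p hp => hPQ p (List.mem_cons_of_mem _ hp)) ⟨hlen, hbnd, hchr⟩
        apply ih _ _ added' _ c3 c1 _ (le_trans hst (c2 start)) hand' haddR' _ hres'
          (by simp only [List.length_cons] at hf; omega)
        · -- the fixpoint invariant after relaxing cur's whole edge list
          intro u huR hu
          by_cases hchg : pvLMget (pvRelaxA (-k) (pvLookup adj cur) rest lm).2 u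
              = pvLMget lm u
          · by_cases huc : u = cur
            · subst huc
              right
              intro e he
              rcases c6 e he with h | h
              · left
                rw [hchg, hkeq]
                omega
              · right
                rw [hchg, hkeq]
                exact h
            · rcases hFix u huR (by rw [← hchg]; exact hu) with ⟨p, hp, he, hv⟩ | h
              · rcases List.mem_cons.mp hp with rfl | hp'
                · exfalso
                  simp only at he
                  exact huc he.symm
                · exact Or.inl ⟨p, c5 p hp', he, by rw [hchg]; exact hv⟩
              · right
                intro e he
                rcases h e he with h' | h'
                · left
                  rw [hchg]
                  exact h'
                · right
                  rw [hchg]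
                  exact le_trans h' (c2 e.1)
          · exact Or.inl (c4 u huR hchg)
        · -- membership characterisation after the relaxation
          intro v hv
          constructor
          · rintro (h | ⟨p, hp, he⟩)
            · rcases (hset _).mp h with h' | rfl
              · have h0 : 0 ≤ pvLMget lm v := (hmm v hv).mp (Or.inl h')
                exact le_trans h0 (c2 v)
              · have h0 : 0 ≤ pvLMget lm v := by omega
                exact le_trans h0 (c2 v)
            · obtain ⟨_, _, hq0, _, hqle⟩ := c3 p hp
              rw [he] at hqle
              omega
          · intro h0
            by_cases hchg : pvLMget (pvRelaxA (-k) (pvLookup adj cur) rest lm).2 v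
                = pvLMget lm v
            · rcases (hmm v hv).mpr (by rw [← hchg]; exact h0) with h | ⟨p, hp, he⟩
              · exact Or.inl ((hset _).mpr (Or.inl h))
              · rcases List.mem_cons.mp hp with rfl | hp'
                · simp only at he
                  exact Or.inl ((hset _).mpr (Or.inr he.symm))
                · exact Or.inr ⟨p, c5 p hp', he⟩
            · obtain ⟨p, hp, he, _⟩ := c4 v hv hchg
              exact Or.inr ⟨p, hp, he⟩

-- invariant of B's budget dict
def pvInvD (adj : List (Int × List (Int × Int))) (start m0 : Int) (R : List Int)
    (d : PySem.Dict Int Int) : Prop :=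
  (PySem.Dict.keys d).Nodup ∧
  (∀ k v : Int, PySem.Dict.get? d k = some v →
    0 ≤ v ∧ v ≤ m0 ∧ pvChain adj start m0 k v ∧ k ∈ R) ∧
  (∃ bs : Int, PySem.Dict.get? d start = some bs ∧ m0 ≤ bs)

lemma gD_cases (d : PySem.Dict Int Int) (k : Int) :
    (PySem.Dict.get? d k = none ∧ pvGD d k = -1) ∨ PySem.Dict.get? d k = some (pvGD d k) := by
  rcases h : PySem.Dict.get? d k with _ | v
  · left
    refine ⟨rfl, ?_⟩
    rw [pvGD, PySem.Dict.getD_eq_get?_getD, h]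
    rfl
  · right
    rw [pvGD, PySem.Dict.getD_eq_get?_getD, h]
    rfl

lemma gD_insert (d : PySem.Dict Int Int) (k v x : Int) :
    pvGD (PySem.Dict.insert d k v) x = if x = k then v else pvGD d x := by
  simp only [pvGD, PySem.Dict.getD_insert]

lemma mapsum_le (l : List Int) (f g : Int → Nat) (h : ∀ a ∈ l, f a ≤ g a) :
    (l.map f).sum ≤ (l.map g).sum := by
  induction l with
  | nil => simp
  | cons a t ih =>
    simp only [List.map_cons, List.sum_cons]
    have := h a (List.mem_cons_self ..)
    have := ih fun x hx => h x (List.mem_cons_of_mem _ hx)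
    omega

lemma mapsum_lt (l : List Int) (f g : Int → Nat) (h : ∀ a ∈ l, f a ≤ g a)
    (x : Int) (hx : x ∈ l) (hfg : f x < g x) : (l.map f).sum < (l.map g).sum := by
  induction l with
  | nil => simp at hx
  | cons a t ih =>
    simp only [List.map_cons, List.sum_cons]
    have hh := h a (List.mem_cons_self ..)
    rcases List.mem_cons.mp hx with rfl | hx'
    · have := mapsum_le t f g fun y hy => h y (List.mem_cons_of_mem _ hy)
      omega
    · have := ih (fun y hy => h y (List.mem_cons_of_mem _ hy)) hx'
      omega

lemma mapsum_le_const (l : List Int) (f : Int → Nat) (c : Nat) (h : ∀ a ∈ l, f a ≤ c) :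
    (l.map f).sum ≤ l.length * c := by
  induction l with
  | nil => simp
  | cons a t ih =>
    simp only [List.map_cons, List.sum_cons, List.length_cons, Nat.succ_mul]
    have := h a (List.mem_cons_self ..)
    have := ih fun x hx => h x (List.mem_cons_of_mem _ hx)
    omega

-- B's inner edge loop preserves the invariant; its potential grows strictly on a change
lemma relaxEdges_inv (adj : List (Int × List (Int × Int))) (start m0 : Int) (R : List Int)
    (hGood : ∀ u ∈ R, ∀ e ∈ pvLookup adj u, 0 ≤ e.2)
    (hclosed : ∀ u ∈ R, ∀ e ∈ pvLookup adj u, e.2 ≤ m0 → e.1 ∈ R)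
    (u bu : Int) (hu : u ∈ R) (hbu0 : 0 ≤ bu) (hbum : bu ≤ m0)
    (hch : pvChain adj start m0 u bu) :
    ∀ (edges : List (Int × Int)), (∀ e ∈ edges, e ∈ pvLookup adj u) →
    ∀ (d : PySem.Dict Int Int) (ch : Bool), pvInvD adj start m0 R d →
    pvInvD adj start m0 R (pvRelaxEdges bu edges d ch).1 ∧
    (∀ v : Int, pvGD d v ≤ pvGD (pvRelaxEdges bu edges d ch).1 v) ∧
    pvQ m0 R d ≤ pvQ m0 R (pvRelaxEdges bu edges d ch).1 ∧
    (ch = true → (pvRelaxEdges bu edges d ch).2 = true) ∧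
    ((pvRelaxEdges bu edges d ch).2 = false → (pvRelaxEdges bu edges d ch).1 = d ∧ ch = false ∧
      ∀ e ∈ edges, ¬ (0 ≤ bu - e.2 ∧ pvGD d e.1 < bu - e.2)) ∧
    (ch = false → (pvRelaxEdges bu edges d ch).2 = true →
      pvQ m0 R d < pvQ m0 R (pvRelaxEdges bu edges d ch).1) := by
  intro edges
  induction edges with
  | nil =>
    intro _ d ch hInv
    simp only [pvRelaxEdges]
    refine ⟨hInv, fun v => le_refl _, le_refl _, fun h => h, ?_, ?_⟩
    · intro h
      exact ⟨trivial, h, fun e he => absurd he (List.not_mem_nil)⟩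
    · intro h1 h2
      rw [h1] at h2
      cases h2
  | cons e rest ih =>
    obtain ⟨v, w⟩ := e
    intro hes d ch hInv
    have hmem : (v, w) ∈ pvLookup adj u := hes (v, w) (List.mem_cons_self ..)
    have hrest : ∀ e ∈ rest, e ∈ pvLookup adj u := fun e he => hes e (List.mem_cons_of_mem _ he)
    have hw0 : 0 ≤ w := hGood u hu (v, w) hmem
    by_cases hc : 0 ≤ bu - w ∧ pvGD d v < bu - w
    · have hcond : (decide (0 ≤ bu - w) && decide (PySem.Dict.getD d v (-1) < bu - w)) = true := by
        rw [show PySem.Dict.getD d v (-1) = pvGD d v from rfl,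
          decide_eq_true hc.1, decide_eq_true hc.2]
        rfl
      have eB : pvRelaxEdges bu ((v, w) :: rest) d ch
          = pvRelaxEdges bu rest (PySem.Dict.insert d v (bu - w)) true := by
        simp only [pvRelaxEdges, hcond, if_true]
      rw [eB]
      have hvR : v ∈ R := hclosed u hu (v, w) hmem (by
        show w ≤ m0
        have := hc.1
        omega)
      have hchv : pvChain adj start m0 v (bu - w) := pvChain.step u bu v w hch hmem hc.1
      obtain ⟨hnd, hval, bs, hbs, hbsm⟩ := hInv
      have hInv' : pvInvD adj start m0 R (PySem.Dict.insert d v (bu - w)) := by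
        refine ⟨PySem.Dict.nodup_keys_insert d v (bu - w) hnd, ?_, ?_⟩
        · intro k vv hk
          rw [PySem.Dict.get?_insert] at hk
          split at hk
          · rename_i hkv
            have hvv : vv = bu - w := by injection hk with h; omega
            subst hkv hvv
            exact ⟨hc.1, by have := hc.1; omega, hchv, hvR⟩
          · exact hval k vv hk
        · by_cases hsv : start = v
          · refine ⟨bu - w, ?_, ?_⟩
            · rw [PySem.Dict.get?_insert, if_pos hsv]
            · have : pvGD d start = bs := by
                rw [pvGD, PySem.Dict.getD_eq_get?_getD, hbs]
                rfl
              rw [hsv] at this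
              omega
          · exact ⟨bs, by rw [PySem.Dict.get?_insert, if_neg hsv]; exact hbs, hbsm⟩
      have hmono : ∀ x : Int, pvGD d x ≤ pvGD (PySem.Dict.insert d v (bu - w)) x := by
        intro x
        rw [gD_insert]
        split
        · rename_i hxv
          subst hxv
          omega
        · exact le_refl _
      have hQlt : pvQ m0 R d < pvQ m0 R (PySem.Dict.insert d v (bu - w)) := by
        apply mapsum_lt R _ _ (fun a _ => by have := hmono a; omega) v hvR
        rw [gD_insert, if_pos rfl]
        have := hc.2
        omega
      obtain ⟨c1, c2, c3, c4, c5, c6⟩ := ih hrest (PySem.Dict.insert d v (bu - w)) true hInv'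
      refine ⟨c1, fun x => le_trans (hmono x) (c2 x), le_trans (le_of_lt hQlt) c3, ?_, ?_, ?_⟩
      · intro _
        exact c4 rfl
      · intro hfalse
        exact absurd (c4 rfl) (by rw [hfalse]; simp)
      · intro _ _
        exact lt_of_lt_of_le hQlt c3
    · have hcond : (decide (0 ≤ bu - w) && decide (PySem.Dict.getD d v (-1) < bu - w)) = false := by
        rw [show PySem.Dict.getD d v (-1) = pvGD d v from rfl]
        rcases Decidable.em (0 ≤ bu - w) with h1 | h1
        · have h2 : ¬ pvGD d v < bu - w := fun h => hc ⟨h1, h⟩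
          rw [decide_eq_false h2, Bool.and_false]
        · rw [decide_eq_false h1, Bool.false_and]
      have eB : pvRelaxEdges bu ((v, w) :: rest) d ch = pvRelaxEdges bu rest d ch := by
        simp only [pvRelaxEdges, hcond, Bool.false_eq_true, if_false]
      rw [eB]
      obtain ⟨c1, c2, c3, c4, c5, c6⟩ := ih hrest d ch hInv
      refine ⟨c1, c2, c3, c4, ?_, c6⟩
      intro hfalse
      obtain ⟨e1, e2, e3⟩ := c5 hfalse
      refine ⟨e1, e2, ?_⟩
      intro e he
      rcases List.mem_cons.mp he with rfl | he'
      · exact hc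
      · exact e3 e he'

-- one whole pass of B preserves the invariant; a pass that reports no change left the
-- dict untouched and fully relaxed
lemma pass_inv (adj : List (Int × List (Int × Int))) (start m0 : Int) (R : List Int)
    (hGood : ∀ u ∈ R, ∀ e ∈ pvLookup adj u, 0 ≤ e.2)
    (hclosed : ∀ u ∈ R, ∀ e ∈ pvLookup adj u, e.2 ≤ m0 → e.1 ∈ R)
    (hnd : (adj.map Prod.fst).Nodup) :
    ∀ (l : List (Int × List (Int × Int))), (∀ p ∈ l, p ∈ adj) →
    ∀ (d : PySem.Dict Int Int) (ch : Bool), pvInvD adj start m0 R d →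
    pvInvD adj start m0 R (pvPass l d ch).1 ∧
    (∀ v : Int, pvGD d v ≤ pvGD (pvPass l d ch).1 v) ∧
    pvQ m0 R d ≤ pvQ m0 R (pvPass l d ch).1 ∧
    (ch = true → (pvPass l d ch).2 = true) ∧
    ((pvPass l d ch).2 = false → (pvPass l d ch).1 = d ∧ ch = false ∧
      ∀ p ∈ l, ∀ e ∈ p.2, 0 ≤ pvGD d p.1 → 0 ≤ pvGD d p.1 - e.2 →
        pvGD d p.1 - e.2 ≤ pvGD d e.1) ∧
    (ch = false → (pvPass l d ch).2 = true →
      pvQ m0 R d < pvQ m0 R (pvPass l d ch).1) := by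
  intro l
  induction l with
  | nil =>
    intro _ d ch hInv
    simp only [pvPass]
    refine ⟨hInv, fun v => le_refl _, le_refl _, fun h => h, ?_, ?_⟩
    · intro h
      exact ⟨trivial, h, fun p hp => absurd hp (List.not_mem_nil)⟩
    · intro h1 h2
      rw [h1] at h2
      cases h2
  | cons p rest ih =>
    obtain ⟨u, edges⟩ := p
    intro hl d ch hInv
    have hpadj : (u, edges) ∈ adj := hl (u, edges) (List.mem_cons_self ..)
    have hrest : ∀ p ∈ rest, p ∈ adj := fun p hp => hl p (List.mem_cons_of_mem _ hp)
    rcases hget : PySem.Dict.get? d u with _ | bu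
    · have eP : pvPass ((u, edges) :: rest) d ch = pvPass rest d ch := by
        simp only [pvPass, hget]
      rw [eP]
      obtain ⟨c1, c2, c3, c4, c5, c6⟩ := ih hrest d ch hInv
      refine ⟨c1, c2, c3, c4, ?_, c6⟩
      intro hfalse
      obtain ⟨e1, e2, e3⟩ := c5 hfalse
      refine ⟨e1, e2, ?_⟩
      intro q hq e he
      rcases List.mem_cons.mp hq with rfl | hq'
      · intro hpos _
        exfalso
        simp only at hpos
        rcases gD_cases d u with ⟨_, hv⟩ | hv
        · omega
        · rw [hget] at hv
          cases hv
      · exact e3 q hq' e he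
    · by_cases hneg : bu < 0
      · have eP : pvPass ((u, edges) :: rest) d ch = pvPass rest d ch := by
          simp only [pvPass, hget, if_pos hneg]
        rw [eP]
        obtain ⟨c1, c2, c3, c4, c5, c6⟩ := ih hrest d ch hInv
        refine ⟨c1, c2, c3, c4, ?_, c6⟩
        intro hfalse
        obtain ⟨e1, e2, e3⟩ := c5 hfalse
        refine ⟨e1, e2, ?_⟩
        intro q hq e he
        rcases List.mem_cons.mp hq with rfl | hq'
        · intro hpos _
          exfalso
          simp only at hpos
          have hgdu : pvGD d u = bu := by
            rw [pvGD, PySem.Dict.getD_eq_get?_getD, hget]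
            rfl
          omega
        · exact e3 q hq' e he
      · obtain ⟨hknd, hval, hstart⟩ := hInv
        obtain ⟨hbu0', hbum, hch, huR⟩ := hval u bu hget
        have hlook : pvLookup adj u = edges := pvLookup_eq_of_mem adj u edges hnd hpadj
        have hes : ∀ e ∈ edges, e ∈ pvLookup adj u := by
          rw [hlook]
          exact fun e he => he
        obtain ⟨c1, c2, c3, c4, c5, c6⟩ :=
          relaxEdges_inv adj start m0 R hGood hclosed u bu huR (by omega) hbum hch
            edges hes d ch ⟨hknd, hval, hstart⟩
        have eP : pvPass ((u, edges) :: rest) d ch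
            = pvPass rest (pvRelaxEdges bu edges d ch).1 (pvRelaxEdges bu edges d ch).2 := by
          simp only [pvPass, hget, if_neg hneg]
        rw [eP]
        obtain ⟨r1, r2, r3, r4, r5, r6⟩ :=
          ih hrest (pvRelaxEdges bu edges d ch).1 (pvRelaxEdges bu edges d ch).2 c1
        refine ⟨r1, fun v => le_trans (c2 v) (r2 v), le_trans c3 r3, ?_, ?_, ?_⟩
        · intro hcht
          exact r4 (c4 hcht)
        · intro hfalse
          obtain ⟨e1, e2, e3⟩ := r5 hfalse
          obtain ⟨f1, f2, f3⟩ := c5 e2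
          refine ⟨e1.trans f1, f2, ?_⟩
          intro q hq e he
          rcases List.mem_cons.mp hq with rfl | hq'
          · intro _ hrel
            simp only at hrel ⊢
            have hgdu : pvGD d u = bu := by
              rw [pvGD, PySem.Dict.getD_eq_get?_getD, hget]
              rfl
            simp only at he
            have hf := f3 e he
            omega
          · rw [f1] at e3
            exact e3 q hq' e he
        · intro hchf hfin
          by_cases hb : (pvRelaxEdges bu edges d ch).2 = true
          · exact lt_of_lt_of_le (c6 hchf hb) r3
          · have hbf : (pvRelaxEdges bu edges d ch).2 = false := by
              simpa using hb
            obtain ⟨f1, _, _⟩ := c5 hbf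
            have hQ := r6 hbf hfin
            rw [f1] at hQ ⊢
            exact hQ

lemma pvQ_le (m0 : Int) (R : List Int) (d : PySem.Dict Int Int)
    (h : ∀ i : Int, pvGD d i ≤ m0) : pvQ m0 R d ≤ R.length * (m0 + 1).toNat := by
  apply mapsum_le_const
  intro a _
  have := h a
  omega

-- B's while-changed loop reaches a relaxation fixpoint
lemma loopBF_inv (adj : List (Int × List (Int × Int))) (start m0 : Int) (items R : List Int)
    (hGood : ∀ u ∈ R, ∀ e ∈ pvLookup adj u, 0 ≤ e.2)
    (hclosed : ∀ u ∈ R, ∀ e ∈ pvLookup adj u, e.2 ≤ m0 → e.1 ∈ R)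
    (hnd : (adj.map Prod.fst).Nodup) (hm0 : 0 ≤ m0)
    (hcard : R.length ≤ items.length + 1) :
    ∀ (fuel : Nat) (d : PySem.Dict Int Int), pvInvD adj start m0 R d →
    (items.length + 1) * (m0 + 1).toNat + 1 < pvQ m0 R d + fuel →
    pvInvD adj start m0 R (pvLoopBF adj fuel d) ∧
    (∀ p ∈ adj, ∀ e ∈ p.2, 0 ≤ pvGD (pvLoopBF adj fuel d) p.1 →
      0 ≤ pvGD (pvLoopBF adj fuel d) p.1 - e.2 →
      pvGD (pvLoopBF adj fuel d) p.1 - e.2 ≤ pvGD (pvLoopBF adj fuel d) e.1) := by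
  intro fuel
  induction fuel with
  | zero =>
    intro d hInv hf
    exfalso
    have hb : ∀ i : Int, pvGD d i ≤ m0 := by
      intro i
      rcases gD_cases d i with ⟨_, hv⟩ | hv
      · omega
      · exact (hInv.2.1 i _ hv).2.1
    have h1 := pvQ_le m0 R d hb
    have h2 := Nat.mul_le_mul_right ((m0 + 1).toNat) hcard
    omega
  | succ fuel ih =>
    intro d hInv hf
    obtain ⟨c1, c2, c3, c4, c5, c6⟩ :=
      pass_inv adj start m0 R hGood hclosed hnd adj (fun p hp => hp) d false hInv
    by_cases hb : (pvPass adj d false).2 = true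
    · have eL : pvLoopBF adj (fuel + 1) d = pvLoopBF adj fuel (pvPass adj d false).1 := by
        simp only [pvLoopBF, hb, if_true]
      rw [eL]
      have hQ := c6 rfl hb
      exact ih (pvPass adj d false).1 c1 (by omega)
    · have hbf : (pvPass adj d false).2 = false := by simpa using hb
      have eL : pvLoopBF adj (fuel + 1) d = (pvPass adj d false).1 := by
        simp only [pvLoopBF, hbf, Bool.false_eq_true, if_false]
      obtain ⟨f1, _, f3⟩ := c5 hbf
      rw [eL, f1]
      exact ⟨hInv, f3⟩

-- with a negative budget nothing is ever relaxed (all weights in the region are nonnegative)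
lemma relaxA_noop (mcur : Int) (nbrs : List (Int × Int)) (pq : List (Int × Int)) (lm : List Int)
    (h : ∀ e ∈ nbrs, mcur - e.2 < 0) : pvRelaxA mcur nbrs pq lm = (pq, lm) := by
  induction nbrs with
  | nil => rfl
  | cons e rest ih =>
    obtain ⟨nxt, w⟩ := e
    simp only [pvRelaxA, if_pos (h (nxt, w) (List.mem_cons_self ..))]
    exact ih fun e he => h e (List.mem_cons_of_mem _ he)

lemma pass_noop (d : PySem.Dict Int Int)
    (h : ∀ u bu : Int, PySem.Dict.get? d u = some bu → bu < 0) :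
    ∀ (l : List (Int × List (Int × Int))) (ch : Bool), pvPass l d ch = (d, ch) := by
  intro l
  induction l with
  | nil => intro ch; rfl
  | cons p rest ih =>
    obtain ⟨u, edges⟩ := p
    intro ch
    rcases hget : PySem.Dict.get? d u with _ | bu
    · simp only [pvPass, hget]
      exact ih ch
    · simp only [pvPass, hget, if_pos (h u bu hget)]
      exact ih ch

-- summing the items over a key list, skipping start
lemma sumKeys_acc (items : List Int) (start : Int) (ks : List Int) : ∀ a : Int,
    ks.foldl (fun acc v => if v ≠ start then acc + pvGetI items v else acc) a
      = a + ks.foldl (fun acc v => if v ≠ start then acc + pvGetI items v else acc) 0 := by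
  induction ks with
  | nil => intro a; simp
  | cons k t ih =>
    intro a
    simp only [List.foldl_cons]
    rw [ih (if k ≠ start then a + pvGetI items k else a),
      ih (if k ≠ start then 0 + pvGetI items k else 0)]
    split <;> ring

lemma sumKeys_eq (items : List Int) (start : Int) :
    ∀ ks : List Int, pvSumKeys items start ks
      = ((ks.filter (fun v => v ≠ start)).map (fun v => pvGetI items v)).sum := by
  intro ks
  induction ks with
  | nil => rfl
  | cons k t ih =>
    unfold pvSumKeys at ih ⊢
    rw [List.foldl_cons, sumKeys_acc, ih]
    by_cases hks : k ≠ start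
    · rw [if_pos hks, List.filter_cons_of_pos (by simpa using hks), List.map_cons, List.sum_cons]
      ring
    · rw [if_neg hks, List.filter_cons_of_neg (by simpa using hks)]
      ring

-- ===== VERDICT (by name: the statement is the Claim_ definition above) =====
theorem bfs_spec : Claim_equal_bfs := by
  intro start m items adj _ hPre
  obtain ⟨hnodup, hRall, hInj, hWall⟩ := hPre
  unfold Spec_bfs bfs bfs_alt
  have hGood : ∀ u ∈ pvReach adj m start,
      (-(items.length : Int) ≤ u ∧ u < (items.length : Int)) ∧
      ∀ e ∈ pvLookup adj u, 0 ≤ e.2 := by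
    intro u hu
    refine ⟨⟨(hRall u hu).1, (hRall u hu).2.1⟩, ?_⟩
    intro e he
    obtain ⟨p, hp, hk, hep⟩ := mem_pvLookup adj u e he
    exact hWall p hp (hk ▸ hu) e hep
  have hGoodW : ∀ u ∈ pvReach adj m start, ∀ e ∈ pvLookup adj u, 0 ≤ e.2 :=
    fun u hu => (hGood u hu).2
  have hclosed := reach_closed adj m start
  have hsR : start ∈ pvReach adj m start := start_mem_reach adj m start
  have hswin : -(items.length : Int) ≤ start ∧ start < (items.length : Int) := (hGood start hsR).1
  have hpq0 : pvHeapPush [] (-m, start) = [(-m, start)] := rfl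
  have hlen0 : (pvSetI (List.replicate (items.length + 1) (-1 : Int)) start m).length
      = items.length + 1 := by
    unfold pvSetI
    rw [List.length_set, List.length_replicate]
  have hrepwin : -((List.replicate (items.length + 1) (-1 : Int)).length : Int) ≤ start ∧
      start < ((List.replicate (items.length + 1) (-1 : Int)).length : Int) := by
    rw [List.length_replicate]
    push_cast
    omega
  have hg0 : ∀ v : Int, pvLMget (pvSetI (List.replicate (items.length + 1) (-1 : Int)) start m) v
      = if pvIdx (items.length + 1) v = pvIdx (items.length + 1) start then m else -1 := by
    intro v
    rw [pvLMget_setI _ _ _ _ hrepwin.1 hrepwin.2, List.length_replicate]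
    split
    · rfl
    · unfold pvLMget
      rw [List.length_replicate]
      by_cases hlt : pvIdx (items.length + 1) v < items.length + 1
      · exact getD_replicate _ _ _ _ hlt
      · exact getD_of_len_le _ _ _ (by rw [List.length_replicate]; omega)
  have hg0R : ∀ v ∈ pvReach adj m start,
      pvLMget (pvSetI (List.replicate (items.length + 1) (-1 : Int)) start m) v
        = if v = start then m else -1 := by
    intro v hv
    rw [hg0]
    by_cases hvs : v = start
    · rw [if_pos hvs, if_pos (by rw [hvs])]
    · rw [if_neg hvs, if_neg (fun hslot => hvs (hInj v hv start hsR hslot))]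
  have hd0get : ∀ k : Int, PySem.Dict.get? (PySem.Dict.insert PySem.Dict.empty start m) k
      = if k = start then some m else none := by
    intro k
    rw [PySem.Dict.get?_insert]
    split
    · rfl
    · simp
  rcases le_or_gt 0 m with hm | hm
  · -- 0 ≤ m : both loops reach the unique sound relaxation fixpoint
    have hInvPQ0 : pvInvPQ adj start m (pvReach adj m start) [(-m, start)]
        (pvSetI (List.replicate (items.length + 1) (-1 : Int)) start m) := by
      intro p hp
      have hp' : p = (-m, start) := by simpa using hp
      subst hp'
      refine ⟨hsR, ?_, ?_, ?_, ?_⟩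
      · show pvChain adj start m start (-(-m))
        rw [neg_neg]
        exact pvChain.base
      · show (0 : Int) ≤ -(-m)
        omega
      · show -(-m) ≤ m
        omega
      · show -(-m) ≤ _
        rw [hg0R start hsR, if_pos rfl]
        omega
    have hInvLM0 : pvInvLM adj start m (pvReach adj m start) items.length
        (pvSetI (List.replicate (items.length + 1) (-1 : Int)) start m) := by
      refine ⟨hlen0, ?_, ?_⟩
      · intro s
        unfold pvSetI
        rw [getD_set _ _ _ _ _ (by
          rw [List.length_replicate]
          exact pvIdx_lt _ _ (by simpa using hrepwin.1) (by simpa using hrepwin.2))]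
        split
        · omega
        · by_cases hlt : s < items.length + 1
          · rw [getD_replicate _ _ _ _ (by rw [List.length_replicate] at *; omega)]
            omega
          · rw [getD_of_len_le _ _ _ (by rw [List.length_replicate]; omega)]
            omega
      · intro v hv
        rw [hg0R v hv]
        split
        · rename_i hvs
          subst hvs
          exact Or.inr pvChain.base
        · exact Or.inl rfl
    have hInvFix0 : pvInvFix adj (pvReach adj m start) [(-m, start)]
        (pvSetI (List.replicate (items.length + 1) (-1 : Int)) start m) := by
      intro u huR hu
      rw [hg0R u huR] at hu
      by_cases hus : u = start
      · subst hus
        left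
        refine ⟨(-m, u), List.mem_cons_self .., rfl, ?_⟩
        show -(-m) = _
        rw [hg0R u huR, if_pos rfl]
        omega
      · rw [if_neg hus] at hu
        exact absurd hu (by decide)
    obtain ⟨lmf, addedf, ⟨hflen, hfbnd, hfchr⟩, hfst, hffix, hfand, hfaR, hfiff, hAeq⟩ :=
      loopA_inv adj start m items (pvReach adj m start) hGood hclosed hInj (pvFuel m items)
        [(-m, start)] (pvSetI (List.replicate (items.length + 1) (-1 : Int)) start m)
        PySem.Set.empty 0 hInvPQ0 hInvLM0 hInvFix0
        (by rw [hg0R start hsR, if_pos rfl])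
        (by simp [PySem.Set.empty])
        (by intro x hx; exact absurd hx (by simp [PySem.Set.empty]))
        (by
          intro v hv
          rw [hg0R v hv]
          constructor
          · rintro (h | ⟨p, hp, he⟩)
            · exact absurd h (by simp [PySem.Set.empty])
            · have hp' : p = (-m, start) := by simpa using hp
              subst hp'
              simp only at he
              rw [if_pos he.symm]
              omega
          · intro h0
            by_cases hvs : v = start
            · exact Or.inr ⟨(-m, start), List.mem_cons_self .., hvs.symm⟩
            · rw [if_neg hvs] at h0
              exact absurd h0 (by decide))
        (by simp [PySem.Set.empty])
        (by
          have hb : ∀ v ∈ pvSetI (List.replicate (items.length + 1) (-1 : Int)) start m,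
              (m - v).toNat ≤ (m + 1).toNat := by
            intro v hv
            unfold pvSetI at hv
            rcases List.mem_or_eq_of_mem_set hv with h | rfl
            · have := List.eq_of_mem_replicate h
              subst this
              omega
            · omega
          have h1 := pvS_le m _ ((m + 1).toNat) hb
          rw [hlen0] at h1
          unfold pvFuel
          simp only [List.length_cons, List.length_nil]
          omega)
    have hInvD0 : pvInvD adj start m (pvReach adj m start)
        (PySem.Dict.insert PySem.Dict.empty start m) := by
      refine ⟨?_, ?_, ⟨m, by rw [hd0get, if_pos rfl], le_refl m⟩⟩
      · exact PySem.Dict.nodup_keys_insert _ _ _ (by simp)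
      · intro k v hk
        rw [hd0get] at hk
        split at hk
        · rename_i hks
          injection hk with hk'
          subst hks
          exact ⟨by omega, by omega, by rw [← hk']; exact pvChain.base, hsR⟩
        · cases hk
    have hcard : (pvReach adj m start).length ≤ items.length + 1 := by
      apply length_le_of_inj _ _ (pvIdx (items.length + 1)) (reach_nodup adj m start)
      · intro x hx
        have hw := (hGood x hx).1
        exact pvIdx_lt _ _ (by push_cast; omega) (by push_cast; omega)
      · exact hInj
    obtain ⟨⟨hfnd, hfval, bsf, hbsf, hbsfm⟩, hBfix⟩ :=
      loopBF_inv adj start m items (pvReach adj m start) hGoodW hclosed hnodup hm hcard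
        (pvFuel m items) (PySem.Dict.insert PySem.Dict.empty start m) hInvD0
        (by unfold pvFuel; omega)
    have hfa : ∀ v : Int,
        (if v ∈ pvReach adj m start then pvLMget lmf v else -1)
          = pvGD (pvLoopBF adj (pvFuel m items) (PySem.Dict.insert PySem.Dict.empty start m)) v := by
      apply tables_eq adj start m _ _ hm
      · intro v
        split
        · rename_i hvR
          exact hfchr v hvR
        · exact Or.inl rfl
      · intro v
        rcases gD_cases (pvLoopBF adj (pvFuel m items)
            (PySem.Dict.insert PySem.Dict.empty start m)) v with ⟨_, hv⟩ | hv
        · exact Or.inl hv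
        · exact Or.inr (hfval v _ hv).2.2.1
      · intro v
        split
        · exact (hfbnd _).1
        · omega
      · intro v
        rcases gD_cases (pvLoopBF adj (pvFuel m items)
            (PySem.Dict.insert PySem.Dict.empty start m)) v with ⟨_, hv⟩ | hv
        · omega
        · have := (hfval v _ hv).1
          omega
      · rw [if_pos hsR]
        exact hfst
      · have : pvGD (pvLoopBF adj (pvFuel m items)
            (PySem.Dict.insert PySem.Dict.empty start m)) start = bsf := by
          rw [pvGD, PySem.Dict.getD_eq_get?_getD, hbsf]
          rfl
        omega
      · intro u v w hmemuv hfu0 hfuw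
        by_cases huR : u ∈ pvReach adj m start
        · rw [if_pos huR] at hfu0 hfuw ⊢
          have hvR : v ∈ pvReach adj m start := hclosed u huR (v, w) hmemuv (by
            have := (hfbnd (pvIdx lmf.length u)).2
            show w ≤ m
            unfold pvLMget at hfu0 hfuw
            omega)
          rw [if_pos hvR]
          rcases hffix u huR hfu0 (v, w) hmemuv with h | h
          · simp only at h
            omega
          · simp only at h
            exact h
        · rw [if_neg huR] at hfu0
          exact absurd hfu0 (by decide)
      · intro u v w hmemuv hgu0 hguw
        obtain ⟨p, hp, hk, hep⟩ := mem_pvLookup adj u (v, w) hmemuv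
        have hfx := hBfix p hp (v, w) hep
        rw [hk] at hfx
        exact hfx hgu0 hguw
    have hkey_mem : ∀ x : Int,
        x ∈ PySem.Dict.keys (pvLoopBF adj (pvFuel m items)
          (PySem.Dict.insert PySem.Dict.empty start m))
        ↔ 0 ≤ pvGD (pvLoopBF adj (pvFuel m items)
            (PySem.Dict.insert PySem.Dict.empty start m)) x := by
      intro x
      constructor
      · intro hx
        rcases gD_cases (pvLoopBF adj (pvFuel m items)
            (PySem.Dict.insert PySem.Dict.empty start m)) x with ⟨hnone, _⟩ | hsome
        · exact absurd hx ((PySem.Dict.get?_eq_none_iff_not_mem_keys _ _).mp hnone)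
        · have := (hfval x _ hsome).1
          omega
      · intro h0
        rcases gD_cases (pvLoopBF adj (pvFuel m items)
            (PySem.Dict.insert PySem.Dict.empty start m)) x with ⟨_, hv⟩ | hsome
        · omega
        · by_contra hnot
          rw [(PySem.Dict.get?_eq_none_iff_not_mem_keys _ _).mpr hnot] at hsome
          cases hsome
    have hkeyR : ∀ k ∈ PySem.Dict.keys (pvLoopBF adj (pvFuel m items)
        (PySem.Dict.insert PySem.Dict.empty start m)), k ∈ pvReach adj m start := by
      intro k hk
      rcases gD_cases (pvLoopBF adj (pvFuel m items)
          (PySem.Dict.insert PySem.Dict.empty start m)) k with ⟨hnone, _⟩ | hsome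
      · exact absurd hk ((PySem.Dict.get?_eq_none_iff_not_mem_keys _ _).mp hnone)
      · exact (hfval k _ hsome).2.2.2
    -- the visited sets of the two programs coincide, hence so do the item sums
    have hsame : ∀ x : Int, x ∈ addedf ↔ x ∈ PySem.Dict.keys (pvLoopBF adj (pvFuel m items)
        (PySem.Dict.insert PySem.Dict.empty start m)) := by
      intro x
      constructor
      · intro hx
        have hxR := hfaR x hx
        have h0 : 0 ≤ pvLMget lmf x := (hfiff x hxR).mp hx
        apply (hkey_mem x).mpr
        rw [← hfa x, if_pos hxR]
        exact h0
      · intro hx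
        have hxR := hkeyR x hx
        have h0 := (hkey_mem x).mp hx
        rw [← hfa x, if_pos hxR] at h0
        exact (hfiff x hxR).mpr h0
    have hperm : addedf.Perm (PySem.Dict.keys (pvLoopBF adj (pvFuel m items)
        (PySem.Dict.insert PySem.Dict.empty start m))) := by
      apply (List.perm_ext_iff_of_nodup hfand hfnd).mpr
      exact hsame
    have hstk : start ∈ PySem.Dict.keys (pvLoopBF adj (pvFuel m items)
        (PySem.Dict.insert PySem.Dict.empty start m)) := by
      apply (hkey_mem start).mpr
      rw [← hfa start, if_pos hsR]
      omega
    rw [hpq0, hAeq, sumKeys_eq]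
    have h1 : (addedf.map (fun v => pvGetI items v)).sum
        = ((PySem.Dict.keys (pvLoopBF adj (pvFuel m items)
            (PySem.Dict.insert PySem.Dict.empty start m))).map (fun v => pvGetI items v)).sum :=
      (hperm.map _).sum_eq
    rw [h1]
    -- split start off the key sum
    have hperm2 : (PySem.Dict.keys (pvLoopBF adj (pvFuel m items)
        (PySem.Dict.insert PySem.Dict.empty start m))).Perm
        (start :: (PySem.Dict.keys (pvLoopBF adj (pvFuel m items)
          (PySem.Dict.insert PySem.Dict.empty start m))).filter (fun v => v ≠ start)) := by
      have he := List.perm_cons_erase hstk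
      rw [List.Nodup.erase_eq_filter hfnd start] at he
      have hfe : List.filter (fun x => x != start)
            (PySem.Dict.keys (pvLoopBF adj (pvFuel m items)
              (PySem.Dict.insert PySem.Dict.empty start m)))
          = (PySem.Dict.keys (pvLoopBF adj (pvFuel m items)
              (PySem.Dict.insert PySem.Dict.empty start m))).filter (fun v => v ≠ start) := by
        apply List.filter_congr
        intro x _
        rcases eq_or_ne x start with h | h
        · subst h
          simp
        · simp [h]
      rwa [hfe] at he
    rw [(hperm2.map _).sum_eq, List.map_cons, List.sum_cons]
  · -- m < 0 : A pops only start; B's first pass changes nothing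
    have hfuel2 : pvFuel m items = 2 := by
      unfold pvFuel
      rw [show (m + 1).toNat = 0 from by omega]
      ring
    have hw0 : ∀ e ∈ pvLookup adj start, m - e.2 < 0 := by
      intro e he
      have := (hGood start hsR).2 e he
      omega
    have hcont : PySem.Set.contains PySem.Set.empty start = false :=
      pvContains_false _ _ (by simp [PySem.Set.empty])
    have hGIlm : pvGetI (pvSetI (List.replicate (items.length + 1) (-1 : Int)) start m) start
        = m := by
      rw [pvGetI_LMget _ start (by rw [hlen0]; push_cast; omega) (by rw [hlen0]; push_cast; omega),
        hg0, if_pos rfl]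
    have hA : pvLoopA items adj 2 [(-m, start)]
        (pvSetI (List.replicate (items.length + 1) (-1 : Int)) start m) PySem.Set.empty 0
        = pvGetI items start := by
      simp only [pvLoopA, hcont, Bool.false_eq_true, if_false, hGIlm]
      rw [show -m * -1 = m from by ring, if_neg (lt_irrefl m),
        relaxA_noop m (pvLookup adj start) [] _ hw0]
      ring
    have hd0lt : ∀ u bu : Int,
        PySem.Dict.get? (PySem.Dict.insert PySem.Dict.empty start m) u = some bu → bu < 0 := by
      intro u bu h
      rw [hd0get] at h
      split at h
      · injection h with h'
        omega
      · cases h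
    have hB : pvLoopBF adj 2 (PySem.Dict.insert PySem.Dict.empty start m)
        = PySem.Dict.insert PySem.Dict.empty start m := by
      show (if (pvPass adj (PySem.Dict.insert PySem.Dict.empty start m) false).2 = true
          then pvLoopBF adj 1 (pvPass adj (PySem.Dict.insert PySem.Dict.empty start m) false).1
          else (pvPass adj (PySem.Dict.insert PySem.Dict.empty start m) false).1)
        = PySem.Dict.insert PySem.Dict.empty start m
      rw [pass_noop _ hd0lt adj false]
      simp
    have hkeys : PySem.Dict.keys (PySem.Dict.insert PySem.Dict.empty start m) = [start] := by
      rw [PySem.Dict.keys_insert_of_not_contains _ m (by simp)]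
      simp
    have hSK : pvSumKeys items start [start] = 0 := by
      unfold pvSumKeys
      simp
    rw [hfuel2, hpq0, hA, hB, hkeys, hSK]
    ring
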